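-- pv_equiv track=rewrite | github.com/CyberTDan/Blockchain | week03/task1.py | computeNED
-- ===== SOURCE A (Python) =====
-- import math
--
-- def computeNED(p : int, q : int) -> tuple[int, int, int]:
--     """
--     Function for computing RSA numbers
--
--     Arguments:
--     p, q - prime numbers
--
--     Returns:
--     n, e, d integer values for encyption / decryption
--     """
--     def isprime(num):
--         for n in range(2,int(num**0.5)+1):
--             if num%n==0:
--                 return False
--         return True
--
--
--     #Extended Euclidean Algorithm
--     def eea(a,b):
--         if(a%b==0):
--             return(b,0,1)
--         else:
--             gcd,s,t = eea(b,a%b)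
--             s = s-((a//b) * t)
--             return(gcd,t,s)
--
--     #Multiplicative Inverse
--     def mult_inv(e,r):
--         gcd,s,_=eea(e,r)
--         if(gcd!=1):
--             return None
--         else:
--             return s%r
--
--     if p == q:
--         raise Exception("Arguments should be different numbers")
--
--     if not (isprime(p) and isprime(q)):
--         raise Exception("Arguments should be prime numbers")
--
--     n = p * q
--
--     phi = (p-1)*(q-1)
--
--     e = 2
--     while(e<phi):
--         if (math.gcd(e, phi) == 1):
--             break
--         else:
--             e += 1
--
--     d = mult_inv(e,phi)
--
--     return [n, e, d]
-- ===== SOURCE B (Python) =====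
-- import math
--
-- def computeNED(p: int, q: int):
--     """RSA n, e, d via an iterative extended Euclid instead of recursion."""
--     def isprime(num):
--         return all(num % n != 0 for n in range(2, int(num ** 0.5) + 1))
--
--     if p == q:
--         raise Exception("Arguments should be different numbers")
--     if not (isprime(p) and isprime(q)):
--         raise Exception("Arguments should be prime numbers")
--
--     n = p * q
--     phi = (p - 1) * (q - 1)
--
--     e = 2
--     while e < phi:
--         if math.gcd(e, phi) == 1:
--             break
--         e += 1
--
--     # iterative extended Euclidean: Bezout coefficient of e w.r.t. phi
--     old_r, r = e, phi
--     old_s, s = 1, 0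
--     while r != 0:
--         qt = old_r // r
--         old_r, r = r, old_r - qt * r
--         old_s, s = s, old_s - qt * s
--
--     d = old_s % phi if old_r == 1 else None
--     return [n, e, d]
-- ===== Notes on version B (the rewrite author's own statement) =====
-- stated objective: alternative
-- what changed: The recursive extended-Euclidean helper eea plus mult_inv is replaced by a single iterative extended-Euclidean loop over (old_r, r, old_s, s) that computes the Bezout coefficient of e forward, with d = old_s % phi when the gcd is 1.
import Mathlib
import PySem

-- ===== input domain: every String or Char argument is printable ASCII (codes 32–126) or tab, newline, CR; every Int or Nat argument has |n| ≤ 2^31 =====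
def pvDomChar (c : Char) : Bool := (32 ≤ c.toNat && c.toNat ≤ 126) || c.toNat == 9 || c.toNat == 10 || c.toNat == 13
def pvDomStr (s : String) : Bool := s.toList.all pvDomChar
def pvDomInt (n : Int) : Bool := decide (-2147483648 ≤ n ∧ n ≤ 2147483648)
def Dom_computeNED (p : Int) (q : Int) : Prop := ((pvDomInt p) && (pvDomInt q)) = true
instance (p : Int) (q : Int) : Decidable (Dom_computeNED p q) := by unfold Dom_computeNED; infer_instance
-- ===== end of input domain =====

-- B replaces A's recursive extended-Euclidean algorithm (eea + mult_inv) by a single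
-- iterative extended-Euclidean loop computing the Bezout coefficient of e directly
-- (objective: alternative decomposition, same cost). Where the Python raises, the ports
-- return [] (those inputs are outside Pre_computeNED).

-- ===== PORT A =====
-- int(num**0.5) for 0 ≤ num ≤ 2^31 equals the integer square root (the double sqrt is
-- exact at the perfect squares in range and cannot cross an integer elsewhere); negative
-- num raises a TypeError (complex power), excluded by Pre_computeNED. pvIsqrt is a
-- kernel-transparent integer square root (largest k with k*k ≤ num).
def pvSqrtGo (n : Nat) : Nat → Nat → Nat
  | 0, k => k
  | f + 1, k => if (k + 1) * (k + 1) ≤ n then pvSqrtGo n f (k + 1) else k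

def pvIsqrt (num : Int) : Int := (pvSqrtGo num.toNat num.toNat 0 : Nat)

-- A's isprime: 'for n in range(2, int(num**0.5)+1): if num%n==0: return False; return True'.
def pvIsprimeLoop (num : Int) : List Int → Bool
  | [] => true
  | n :: rest => if PySem.Int.mod num n = 0 then false else pvIsprimeLoop num rest

def pvIsprimeA (num : Int) : Bool :=
  pvIsprimeLoop num (PySem.List.pyRange 2 (pvIsqrt num + 1) 1)

-- 'e = 2; while e < phi: if gcd(e,phi)==1: break; e += 1' — identical in A and in B,
-- ported once; the Nat fuel (phi - e).toNat is exactly the remaining iteration budget.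
def pvFindEGo : Nat → Int → Int → Int
  | 0, e, _ => e
  | f + 1, e, phi =>
    if e < phi then (if Int.gcd e phi = 1 then e else pvFindEGo f (e + 1) phi) else e

def pvFindE (e : Int) (phi : Int) : Int := pvFindEGo (phi - e).toNat e phi

-- A's recursive eea; fuel b.natAbs is enough since |a % b| < |b| at each call.
-- b = 0 (ZeroDivisionError in Python) yields the junk (0,0,0), outside Pre_computeNED.
def pvEeaGo : Nat → Int → Int → Int × Int × Int
  | 0, _, _ => (0, 0, 0)
  | f + 1, a, b =>
    if b = 0 then (0, 0, 0)
    else if PySem.Int.mod a b = 0 then (b, 0, 1)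
    else
      let t := pvEeaGo f b (PySem.Int.mod a b)
      (t.1, t.2.2, t.2.1 - PySem.Int.floordiv a b * t.2.2)

def pvEea (a : Int) (b : Int) : Int × Int × Int := pvEeaGo b.natAbs a b

def computeNED (p : Int) (q : Int) : List (Option Int) :=
  if p = q then []                                   -- Python: raise Exception
  else if !(pvIsprimeA p && pvIsprimeA q) then []    -- Python: raise Exception
  else
    let n := p * q
    let phi := (p - 1) * (q - 1)
    let e := pvFindE 2 phi
    let t := pvEea e phi                             -- gcd, s, _ = eea(e, phi)
    let d : Option Int := if t.1 ≠ 1 then none else some (PySem.Int.mod t.2.1 phi)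
    [some n, some e, d]

-- ===== PORT B =====
-- B's isprime: all(num % n != 0 for n in range(2, int(num**0.5)+1)).
def pvIsprimeB (num : Int) : Bool :=
  (PySem.List.pyRange 2 (pvIsqrt num + 1) 1).all (fun n => !(PySem.Int.mod num n == 0))

-- B's iterative extended-Euclidean loop 'while r != 0: ...' on (old_r, r, old_s, s);
-- fuel r.natAbs is exactly enough since |old_r % r| < |r| at each step.
def pvIterGo : Nat → Int → Int → Int → Int → Int × Int
  | 0, oldr, _, olds, _ => (oldr, olds)
  | f + 1, oldr, r, olds, s =>
    if r = 0 then (oldr, olds)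
    else
      let qt := PySem.Int.floordiv oldr r
      pvIterGo f r (oldr - qt * r) s (olds - qt * s)

def computeNED_alt (p : Int) (q : Int) : List (Option Int) :=
  if p = q then []                                   -- Python: raise Exception
  else if !(pvIsprimeB p && pvIsprimeB q) then []    -- Python: raise Exception
  else
    let n := p * q
    let phi := (p - 1) * (q - 1)
    let e := pvFindE 2 phi
    let t := pvIterGo phi.natAbs e phi 1 0           -- (old_r, old_s) after the loop
    let d : Option Int := if t.1 = 1 then some (PySem.Int.mod t.2 phi) else none
    [some n, some e, d]

-- ===== PRECONDITION & SPEC =====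
-- Pre_ = exactly the inputs where the Python returns: distinct nonnegative arguments
-- (negative ones raise a TypeError in num**0.5), both 0 or prime (A's trial division
-- accepts exactly 0, 1 and the primes among the nonnegatives; anything else raises
-- Exception), and neither equal to 1 (phi = 0 raises ZeroDivisionError).
def Pre_computeNED (p : Int) (q : Int) : Prop :=
  p ≠ q ∧ 0 ≤ p ∧ 0 ≤ q ∧ p ≠ 1 ∧ q ≠ 1 ∧
  (p = 0 ∨ Nat.Prime p.toNat) ∧ (q = 0 ∨ Nat.Prime q.toNat)
instance (p : Int) (q : Int) : Decidable (Pre_computeNED p q) := by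
  unfold Pre_computeNED; infer_instance

def pvWitness_computeNED : Int × Int := (2, 3)

def Spec_computeNED (p : Int) (q : Int) (out : List (Option Int)) : Prop := out = computeNED_alt p q
instance (p : Int) (q : Int) (out : List (Option Int)) : Decidable (Spec_computeNED p q out) := by
  unfold Spec_computeNED; infer_instance

-- ===== CLAIM (what is proved, stated in full; the proofs are below) =====
def Claim_equal_computeNED : Prop := ∀ (p : Int) (q : Int), Dom_computeNED p q → Pre_computeNED p q → Spec_computeNED p q (computeNED p q)

-- ===== LEMMAS AND PROOFS =====

lemma pv_mod_natAbs_lt (a b : Int) (hb : b ≠ 0) :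
    (PySem.Int.mod a b).natAbs < b.natAbs := by
  rcases lt_trichotomy b 0 with h | h | h
  · have := PySem.Int.mod_neg_bounds a h
    omega
  · exact absurd h hb
  · have h1 := PySem.Int.mod_nonneg a h
    have h2 := PySem.Int.mod_lt a h
    omega

lemma pv_sub_fd_mul (a b : Int) :
    a - PySem.Int.floordiv a b * b = PySem.Int.mod a b := by
  have := PySem.Int.floordiv_mul_add_mod a b
  omega

-- The iterative loop equals the recursive eea composed with its running Bezout row.
lemma pv_iter_eq_eea : ∀ (f : Nat) (a b s0 s1 : Int), b ≠ 0 → b.natAbs ≤ f →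
    pvIterGo f a b s0 s1 =
      ((pvEeaGo f a b).1, (pvEeaGo f a b).2.1 * s0 + (pvEeaGo f a b).2.2 * s1) := by
  intro f
  induction f with
  | zero => intro a b s0 s1 hb hle; omega
  | succ f ih =>
    intro a b s0 s1 hb hle
    by_cases hm : PySem.Int.mod a b = 0
    · simp only [pvIterGo, pvEeaGo, if_neg hb, if_pos hm]
      rw [pv_sub_fd_mul, hm]
      have hf : 1 ≤ f ∨ f = 0 := by omega
      rcases hf with hf | hf
      · obtain ⟨f', rfl⟩ : ∃ f', f = f' + 1 := ⟨f - 1, by omega⟩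
        simp [pvIterGo]
      · subst hf
        simp [pvIterGo]
    · have hmabs := pv_mod_natAbs_lt a b hb
      simp only [pvIterGo, pvEeaGo, if_neg hb, if_neg hm]
      rw [pv_sub_fd_mul]
      rw [ih b (PySem.Int.mod a b) s1 (s0 - PySem.Int.floordiv a b * s1) hm (by omega)]
      simp only [Prod.mk.injEq]
      exact ⟨trivial, by ring⟩

-- pvSqrtGo never overshoots: its result k keeps k*k ≤ n.
lemma pvSqrtGo_sq_le (n : Nat) : ∀ (f k : Nat), k * k ≤ n → pvSqrtGo n f k * pvSqrtGo n f k ≤ n := by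
  intro f
  induction f with
  | zero => intro k hk; simpa [pvSqrtGo] using hk
  | succ f ih =>
    intro k hk
    by_cases h : (k + 1) * (k + 1) ≤ n
    · simpa [pvSqrtGo, h] using ih (k + 1) h
    · simpa [pvSqrtGo, h] using hk

-- 0 and the primes have no divisor in range(2, int(sqrt)+1).
lemma pv_noSmallDiv (num : Int) (h0 : 0 ≤ num) (h : num = 0 ∨ Nat.Prime num.toNat) :
    ∀ d ∈ PySem.List.pyRange 2 (pvIsqrt num + 1) 1, PySem.Int.mod num d ≠ 0 := by
  rcases h with h | hp
  · subst h
    intro d hd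
    rw [PySem.List.mem_pyRange_one] at hd
    have : pvIsqrt 0 = 0 := rfl
    omega
  · intro d hd hmod
    rw [PySem.List.mem_pyRange_one] at hd
    obtain ⟨hd2, hdlt⟩ := hd
    -- d ≤ pvIsqrt num, so d * d ≤ num
    have hsq : (pvIsqrt num) * (pvIsqrt num) ≤ num := by
      have hn := pvSqrtGo_sq_le num.toNat num.toNat 0 (by simp)
      unfold pvIsqrt
      have : ((pvSqrtGo num.toNat num.toNat 0 * pvSqrtGo num.toNat num.toNat 0 : Nat) : Int)
          ≤ ((num.toNat : Nat) : Int) := by exact_mod_cast hn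
      omega
    have hdd : d * d ≤ num := by nlinarith
    have hdvd : d ∣ num := (PySem.Int.mod_eq_zero_iff_dvd num d).mp hmod
    have hdvdN : d.toNat ∣ num.toNat := by
      have hn := Int.natAbs_dvd_natAbs.mpr hdvd
      have e1 : d.toNat = d.natAbs := by omega
      have e2 : num.toNat = num.natAbs := by omega
      rw [e1, e2]; exact hn
    have h2 : num.toNat.Prime := hp
    rcases h2.eq_one_or_self_of_dvd d.toNat hdvdN with h1 | h1
    · omega
    · have hnum2 : 2 ≤ num.toNat := h2.two_le
      have : d = num := by omega
      nlinarith

-- A's early-return trial-division loop accepts when no divisor is found.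
lemma pv_isprimeLoop_true (num : Int) :
    ∀ l : List Int, (∀ d ∈ l, PySem.Int.mod num d ≠ 0) → pvIsprimeLoop num l = true := by
  intro l
  induction l with
  | nil => intro _; rfl
  | cons x xs ih =>
    intro h
    simp only [pvIsprimeLoop, if_neg (h x (by simp))]
    exact ih (fun d hd => h d (by simp [hd]))

lemma pv_isprimeA_true (num : Int)
    (h : ∀ d ∈ PySem.List.pyRange 2 (pvIsqrt num + 1) 1, PySem.Int.mod num d ≠ 0) :
    pvIsprimeA num = true :=
  pv_isprimeLoop_true num _ h

lemma pv_isprimeB_true (num : Int)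
    (h : ∀ d ∈ PySem.List.pyRange 2 (pvIsqrt num + 1) 1, PySem.Int.mod num d ≠ 0) :
    pvIsprimeB num = true := by
  unfold pvIsprimeB
  rw [List.all_eq_true]
  intro d hd
  simp [h d hd]

-- ===== VERDICT (by name: the statement is the Claim_ definition above) =====
theorem computeNED_spec : Claim_equal_computeNED := by
  intro p q _ hpre
  obtain ⟨hne, hp0, hq0, hp1, hq1, hpp, hqp⟩ := hpre
  have hdp := pv_noSmallDiv p hp0 hpp
  have hdq := pv_noSmallDiv q hq0 hqp
  unfold Spec_computeNED computeNED computeNED_alt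
  rw [if_neg hne, if_neg hne,
      pv_isprimeA_true p hdp, pv_isprimeA_true q hdq,
      pv_isprimeB_true p hdp, pv_isprimeB_true q hdq]
  simp only [Bool.and_self, Bool.not_true, Bool.false_eq_true, if_false]
  have hphi : (p - 1) * (q - 1) ≠ 0 :=
    mul_ne_zero (sub_ne_zero_of_ne hp1) (sub_ne_zero_of_ne hq1)
  rw [pvEea, pv_iter_eq_eea ((p - 1) * (q - 1)).natAbs (pvFindE 2 ((p - 1) * (q - 1)))
        ((p - 1) * (q - 1)) 1 0 hphi (le_refl _)]
  set t := pvEeaGo ((p - 1) * (q - 1)).natAbs (pvFindE 2 ((p - 1) * (q - 1))) ((p - 1) * (q - 1))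
  by_cases h1 : t.1 = 1 <;> simp [h1]
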